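-- pv_equiv track=rewrite | github.com/PabstMatthew/https-side-channels | utils.py | segment_times
-- ===== SOURCE A (Python) =====
-- THRESHOLD = 500 * 1000 # (500 ms)
--
-- def segment_times(times):
--     if len(times) <= 1:
--         return [times]
--     times.sort()
--     result = []
--     segment = []
--     for i in range(1, len(times)):
--         segment.append(times[i-1])
--         diff = (times[i]-times[i-1])
--         if diff > THRESHOLD:
--             result.append(segment)
--             segment = []
--     segment.append(times[-1])
--     result.append(segment)
--     return result
-- ===== SOURCE B (Python) =====
-- THRESHOLD = 500 * 1000 # (500 ms)
--
-- def segment_times(times):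
--     if len(times) <= 1:
--         return [times]
--     times.sort()
--     cuts = [i for i in range(1, len(times)) if times[i] - times[i-1] > THRESHOLD]
--     bounds = [0] + cuts + [len(times)]
--     return [times[a:b] for a, b in zip(bounds, bounds[1:])]
-- ===== Notes on version B (the rewrite author's own statement) =====
-- stated objective: alternative
-- what changed: Replaces A's incremental accumulate-and-flush segment building with a two-pass decomposition: first collect the boundary indices where the gap exceeds THRESHOLD, then slice the sorted list between consecutive boundaries.
import Mathlib
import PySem

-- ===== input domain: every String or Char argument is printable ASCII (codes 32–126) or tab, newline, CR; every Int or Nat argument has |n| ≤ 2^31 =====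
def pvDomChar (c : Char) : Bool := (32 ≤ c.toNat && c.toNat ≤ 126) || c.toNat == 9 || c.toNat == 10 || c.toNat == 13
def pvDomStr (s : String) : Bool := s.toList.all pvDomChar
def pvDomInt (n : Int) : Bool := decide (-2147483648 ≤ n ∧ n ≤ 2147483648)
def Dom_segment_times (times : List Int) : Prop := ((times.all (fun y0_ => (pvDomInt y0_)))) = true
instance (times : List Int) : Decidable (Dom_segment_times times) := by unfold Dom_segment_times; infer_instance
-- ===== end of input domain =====

-- B replaces A's accumulate-and-flush segment building with a two-pass decomposition (collect gap
-- boundary indices, then slice between consecutive boundaries); same cost. Python A and B both sort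
-- the argument in place; the equivalence proved here is about the return value.


-- module constant THRESHOLD = 500 * 1000
def pyTHRESHOLD : Int := 500 * 1000

-- ===== PORT A =====
-- body of A's 'for i in range(1, len(times))' loop; state = (result, segment)
def aBody (ts : List Int) (acc : List (List Int) × List Int) (i : Int) :
    List (List Int) × List Int :=
  let seg := acc.2 ++ [PySem.List.pyGetD ts (i-1) 0]
  let diff := PySem.List.pyGetD ts i 0 - PySem.List.pyGetD ts (i-1) 0
  if diff > pyTHRESHOLD then (acc.1 ++ [seg], []) else (acc.1, seg)

-- the loop followed by 'segment.append(times[-1]); result.append(segment)'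
def aMain (ts : List Int) (res : List (List Int)) (seg : List Int) : List (List Int) :=
  let st := (PySem.List.pyRange 1 (ts.length : Int) 1).foldl (aBody ts) (res, seg)
  st.1 ++ [st.2 ++ [PySem.List.pyGetD ts (-1) 0]]

def segment_times (times : List Int) : List (List Int) :=
  if times.length <= 1 then [times]
  else aMain (PySem.List.sorted times (fun t => t) false) [] []

-- ===== PORT B =====
-- the gap test 'times[i] - times[i-1] > THRESHOLD'
def bGap (ts : List Int) (i : Int) : Bool :=
  PySem.List.pyGetD ts i 0 - PySem.List.pyGetD ts (i-1) 0 > pyTHRESHOLD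

-- 'cuts = [...]; bounds = [0] + cuts + [len(times)]; [times[a:b] for a, b in zip(bounds, bounds[1:])]'
def bMain (ts : List Int) : List (List Int) :=
  let cuts := (PySem.List.pyRange 1 (ts.length : Int) 1).filter (bGap ts)
  let bounds := 0 :: (cuts ++ [(ts.length : Int)])
  (bounds.zip bounds.tail).map (fun p => PySem.List.slice ts (some p.1) (some p.2))

def segment_times_alt (times : List Int) : List (List Int) :=
  if times.length <= 1 then [times]
  else bMain (PySem.List.sorted times (fun t => t) false)

-- ===== PRECONDITION & SPEC =====
def Spec_segment_times (times : List Int) (out : List (List Int)) : Prop := out = segment_times_alt times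
instance (times : List Int) (out : List (List Int)) : Decidable (Spec_segment_times times out) := by unfold Spec_segment_times; infer_instance

-- ===== CLAIM (what is proved, stated in full; the proofs are below) =====
def Claim_equal_segment_times : Prop := ∀ (times : List Int), Dom_segment_times times → Spec_segment_times times (segment_times times)

-- ===== LEMMAS AND PROOFS =====

lemma pyGetD_cons_shift (z d : Int) (ts : List Int) (k : Nat) :
    PySem.List.pyGetD (z :: ts) ((k : Int) + 1) d = PySem.List.pyGetD ts (k : Int) d := by
  have h : ((k : Int) + 1) = ((k + 1 : Nat) : Int) := by push_cast; ring
  rw [h, PySem.List.pyGetD_natCast, PySem.List.pyGetD_natCast, List.getD_cons_succ]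

lemma aBody_shift (z : Int) (ts : List Int) (st : List (List Int) × List Int) (k : Nat) :
    aBody (z :: ts) st (2 + (k : Int)) = aBody ts st (1 + (k : Int)) := by
  have h1 : (2 + (k : Int)) - 1 = (k : Int) + 1 := by ring
  have h2 : (2 + (k : Int)) = ((k + 1 : Nat) : Int) + 1 := by push_cast; ring
  have h3 : (1 + (k : Int)) - 1 = (k : Int) := by ring
  have h4 : (1 + (k : Int)) = (k : Int) + 1 := by ring
  simp only [aBody]
  rw [h1, pyGetD_cons_shift, h2, pyGetD_cons_shift, h3, h4]
  push_cast
  ring_nf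

lemma aFold_shift (z : Int) (ts : List Int) (st : List (List Int) × List Int) :
    (PySem.List.pyRange 2 ((z :: ts).length : Int) 1).foldl (aBody (z :: ts)) st
      = (PySem.List.pyRange 1 (ts.length : Int) 1).foldl (aBody ts) st := by
  rw [PySem.List.pyRange_one, PySem.List.pyRange_one]
  have hm : (((z :: ts).length : Int) - 2).toNat = ((ts.length : Int) - 1).toNat := by
    simp; omega
  rw [hm, List.foldl_map, List.foldl_map]
  congr 1
  funext s k
  exact aBody_shift z ts s k

def segRec (x : Int) : List Int → List (List Int)
  | [] => [[x]]
  | y :: r =>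
    if y - x > pyTHRESHOLD then [x] :: segRec y r
    else
      match segRec y r with
      | [] => [[x]]
      | s :: ss => (x :: s) :: ss

lemma segRec_ne_nil (x : Int) (l : List Int) : segRec x l ≠ [] := by
  cases l with
  | nil => simp [segRec]
  | cons y r =>
    simp only [segRec]
    split
    · simp
    · cases h : segRec y r <;> simp

def consFirst (pre : List Int) : List (List Int) → List (List Int)
  | [] => [pre]
  | s :: ss => (pre ++ s) :: ss

lemma consFirst_nil_of_ne_nil {S : List (List Int)} (h : S ≠ []) : consFirst [] S = S := by
  cases S with
  | nil => exact absurd rfl h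
  | cons s ss => simp [consFirst]

lemma aMain_eq_segRec (tl : List Int) : ∀ (x : Int) (res : List (List Int)) (seg : List Int),
    aMain (x :: tl) res seg = res ++ consFirst seg (segRec x tl) := by
  induction tl with
  | nil =>
    intro x res seg
    unfold aMain
    rw [show (([x] : List Int).length : Int) = 1 by simp,
        PySem.List.pyRange_one_eq_nil (le_refl 1)]
    simp [segRec, consFirst, PySem.List.pyGetD_neg_one ([x] : List Int) 0 (by simp)]
  | cons y r ih =>
    intro x res seg
    unfold aMain
    rw [PySem.List.pyRange_one_cons (by simp only [List.length_cons]; push_cast; omega)]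
    rw [List.foldl_cons]
    have hb1 : aBody (x :: y :: r) (res, seg) 1
        = if y - x > pyTHRESHOLD then (res ++ [seg ++ [x]], ([] : List Int))
          else (res, seg ++ [x]) := by
      have h0 : PySem.List.pyGetD (x :: y :: r) (1 - 1 : Int) 0 = x := by
        norm_num [PySem.List.pyGetD_zero_cons]
      have h1 : PySem.List.pyGetD (x :: y :: r) (1 : Int) 0 = y := by
        have := pyGetD_cons_shift x 0 (y :: r) 0
        simpa using this
      simp only [aBody, h0, h1]
    rw [hb1]
    have hshift := aFold_shift x (y :: r)
    have hlast : PySem.List.pyGetD (x :: y :: r) (-1) 0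
        = PySem.List.pyGetD (y :: r) (-1) 0 := by
      rw [PySem.List.pyGetD_neg_one _ 0 (by simp), PySem.List.pyGetD_neg_one _ 0 (by simp)]
      exact List.getLast_cons (by simp)
    have e2 : (1 : Int) + 1 = 2 := by norm_num
    split
    · rename_i hgap
      rw [e2, hshift, hlast]
      have := ih y (res ++ [seg ++ [x]]) []
      unfold aMain at this
      rw [this, consFirst_nil_of_ne_nil (segRec_ne_nil y r)]
      have hseg : segRec x (y :: r) = [x] :: segRec y r := by
        simp [segRec, hgap]
      rw [hseg]
      simp [consFirst]
    · rename_i hgap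
      rw [e2, hshift, hlast]
      have := ih y res (seg ++ [x])
      unfold aMain at this
      rw [this]
      have hseg : segRec x (y :: r) = match segRec y r with
        | [] => [[x]]
        | s :: ss => (x :: s) :: ss := by
        simp [segRec, hgap]
      rw [hseg]
      cases hS : segRec y r with
      | nil => exact absurd hS (segRec_ne_nil y r)
      | cons s ss => simp [consFirst]

lemma bGap_shift (z : Int) (ts : List Int) (k : Nat) :
    bGap (z :: ts) (2 + (k : Int)) = bGap ts (1 + (k : Int)) := by
  have h1 : (2 + (k : Int)) - 1 = (k : Int) + 1 := by ring
  have h2 : 2 + (k : Int) = ((k + 1 : Nat) : Int) + 1 := by push_cast; ring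
  have h3 : 1 + (k : Int) - 1 = (k : Int) := by ring
  have h4 : 1 + (k : Int) = (k : Int) + 1 := by ring
  simp only [bGap]
  rw [h1, pyGetD_cons_shift, h2, pyGetD_cons_shift, h3, h4]
  norm_cast

lemma bCuts_shift (z : Int) (ts : List Int) :
    (PySem.List.pyRange 2 ((z :: ts).length : Int) 1).filter (bGap (z :: ts))
      = ((PySem.List.pyRange 1 (ts.length : Int) 1).filter (bGap ts)).map (· + 1) := by
  rw [PySem.List.pyRange_one, PySem.List.pyRange_one]
  have hm : (((z :: ts).length : Int) - 2).toNat = ((ts.length : Int) - 1).toNat := by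
    simp; omega
  rw [hm, List.filter_map, List.filter_map]
  have hp : (bGap (z :: ts) ∘ fun k : Nat => 2 + (k : Int))
      = (bGap ts ∘ fun k : Nat => 1 + (k : Int)) := by
    funext k
    exact bGap_shift z ts k
  rw [hp, List.map_map]
  apply List.map_congr_left
  intro k _
  simp only [Function.comp]
  ring

def slices (ts : List Int) (bs : List Int) : List (List Int) :=
  (bs.zip bs.tail).map (fun p => PySem.List.slice ts (some p.1) (some p.2))

lemma slices_cons_cons (ts : List Int) (a b : Int) (rest : List Int) :
    slices ts (a :: b :: rest) = PySem.List.slice ts (some a) (some b) :: slices ts (b :: rest) := by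
  simp [slices]

lemma slice_cons_shift (x : Int) (ts : List Int) (a b : Int) (ha : 0 ≤ a) (hb : 0 ≤ b) :
    PySem.List.slice (x :: ts) (some (a + 1)) (some (b + 1)) = PySem.List.slice ts (some a) (some b) := by
  rw [PySem.List.slice_toNat _ (by omega) (by omega), PySem.List.slice_toNat _ ha hb]
  have h1 : (a + 1).toNat = a.toNat + 1 := by omega
  have h2 : (b + 1).toNat = b.toNat + 1 := by omega
  rw [h1, h2]
  simp [List.drop_succ_cons]

lemma slices_cons_shift (x : Int) (ts : List Int) (bs : List Int) (h : ∀ b ∈ bs, 0 ≤ b) :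
    slices (x :: ts) (bs.map (· + 1)) = slices ts bs := by
  simp only [slices]
  rw [← List.map_tail]
  rw [List.zip_map]
  rw [List.map_map]
  apply List.map_congr_left
  intro p hp
  obtain ⟨h1, h2⟩ := List.of_mem_zip hp
  exact slice_cons_shift x ts p.1 p.2 (h _ h1) (h _ (List.mem_of_mem_tail h2))

lemma slice_zero_succ (x : Int) (ts : List Int) (c : Int) (hc : 0 ≤ c) :
    PySem.List.slice (x :: ts) (some 0) (some (c + 1))
      = x :: PySem.List.slice ts (some 0) (some c) := by
  rw [PySem.List.slice_toNat _ (by omega) (by omega), PySem.List.slice_toNat _ (by omega) hc]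
  have h2 : (c + 1).toNat = c.toNat + 1 := by omega
  simp [h2]

lemma bMain_eq_slices (ts : List Int) :
    bMain ts = slices ts (0 :: ((PySem.List.pyRange 1 (ts.length : Int) 1).filter (bGap ts)
      ++ [(ts.length : Int)])) := rfl

lemma bMain_eq_segRec (tl : List Int) : ∀ (x : Int), bMain (x :: tl) = segRec x tl := by
  induction tl with
  | nil =>
    intro x
    rw [bMain_eq_slices]
    rw [show (([x] : List Int).length : Int) = 1 by simp,
        PySem.List.pyRange_one_eq_nil (le_refl 1)]
    simp only [List.filter_nil, List.nil_append]
    have h1 : PySem.List.slice ([x] : List Int) (some 0) (some 1)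
        = x :: PySem.List.slice ([] : List Int) (some 0) (some 0) := by
      have := slice_zero_succ x [] 0 (le_refl 0)
      norm_num at this ⊢
      exact this
    have h2 : PySem.List.slice ([] : List Int) (some 0) (some 0) = [] := by
      rw [PySem.List.slice_toNat _ (le_refl 0) (le_refl 0)]
      simp
    simp [slices, segRec, h1, h2]
  | cons y r ih =>
    intro x
    rw [bMain_eq_slices]
    rw [PySem.List.pyRange_one_cons (by simp only [List.length_cons]; push_cast; omega)]
    rw [List.filter_cons]
    have e2 : (1 : Int) + 1 = 2 := by norm_num
    rw [e2, bCuts_shift]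
    have hlen2 : (((x :: y :: r).length : Int)) = ((y :: r).length : Int) + 1 := by simp
    rw [hlen2]
    set cuts' := (PySem.List.pyRange 1 (((y :: r).length : Int)) 1).filter (bGap (y :: r)) with hc
    set n' : Int := ((y :: r).length : Int) with hn
    have hg : bGap (x :: y :: r) 1 = decide (y - x > pyTHRESHOLD) := by
      have h1 : PySem.List.pyGetD (x :: y :: r) (1 : Int) 0 = y := by
        simpa using pyGetD_cons_shift x 0 (y :: r) 0
      have h0 : PySem.List.pyGetD (x :: y :: r) (1 - 1 : Int) 0 = x := by
        norm_num [PySem.List.pyGetD_zero_cons]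
      simp only [bGap, h1, h0]
    have hpos : ∀ b ∈ cuts' ++ [n'], 0 ≤ b := by
      intro b hb
      rcases List.mem_append.mp hb with h | h
      · have := List.mem_filter.mp h
        have := (PySem.List.mem_pyRange_one.mp this.1).1
        omega
      · simp at h
        subst h
        positivity
    have hM : cuts' ++ [n'] ≠ [] := by simp
    have hmap : (cuts'.map (· + 1)) ++ [n' + 1] = (cuts' ++ [n']).map (· + 1) := by
      simp
    have hB : slices (y :: r) (0 :: (cuts' ++ [n'])) = segRec y r := by
      rw [← bMain_eq_slices]
      exact ih y
    by_cases hgap : y - x > pyTHRESHOLD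
    · rw [hg]
      simp only [hgap, decide_true, if_true]
      -- bounds = 0 :: 1 :: (cuts'.map (·+1) ++ [n'+1])
      have hshape : (1 :: cuts'.map (· + 1)) ++ [n' + 1]
          = 1 :: ((cuts' ++ [n']).map (· + 1)) := by
        simp
      rw [hshape, slices_cons_cons]
      have h1 : (1 : Int) :: ((cuts' ++ [n']).map (· + 1)) = (0 :: (cuts' ++ [n'])).map (· + 1) := by
        simp
      rw [h1, slices_cons_shift x (y :: r) _ (by
        intro b hb
        rcases List.mem_cons.mp hb with h | h
        · omega
        · exact hpos b h)]
      rw [hB]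
      have hfirst : PySem.List.slice (x :: y :: r) (some 0) (some 1) = [x] := by
        rw [PySem.List.slice_toNat _ (by norm_num) (by norm_num)]
        simp
      rw [hfirst]
      simp [segRec, hgap]
    · rw [hg]
      simp only [hgap, decide_false, Bool.false_eq_true, if_false]
      rw [hmap]
      cases hMc : cuts' ++ [n'] with
      | nil => exact absurd hMc hM
      | cons c cs =>
        have hposc : 0 ≤ c := hpos c (by rw [hMc]; simp)
        have hposcs : ∀ b ∈ cs, 0 ≤ b := fun b hb => hpos b (by rw [hMc]; simp [hb])
        simp only [List.map_cons]
        rw [slices_cons_cons]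
        have h1 : (c + 1) :: cs.map (· + 1) = (c :: cs).map (· + 1) := by simp
        rw [h1, slices_cons_shift x (y :: r) _ (by
          intro b hb
          rcases List.mem_cons.mp hb with h | h
          · omega
          · exact hposcs b h)]
        rw [slice_zero_succ x (y :: r) c hposc]
        rw [hMc, slices_cons_cons] at hB
        cases hS : segRec y r with
        | nil => exact absurd hS (segRec_ne_nil y r)
        | cons s ss =>
          rw [hS] at hB
          injection hB with hB1 hB2
          have hseg : segRec x (y :: r) = (x :: s) :: ss := by
            simp [segRec, hgap, hS]
          rw [hseg, hB1, hB2]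

-- ===== VERDICT (by name: the statement is the Claim_ definition above) =====
theorem segment_times_spec : Claim_equal_segment_times := by
  intro times _
  show segment_times times = segment_times_alt times
  unfold segment_times segment_times_alt
  split
  · rfl
  · rename_i h
    have hlen : (PySem.List.sorted times (fun t => t) false).length = times.length :=
      PySem.List.length_sorted _ _ _
    cases hs : PySem.List.sorted times (fun t => t) false with
    | nil =>
      exfalso
      rw [hs] at hlen
      simp at hlen
      omega
    | cons x tl =>
      rw [aMain_eq_segRec, bMain_eq_segRec, consFirst_nil_of_ne_nil (segRec_ne_nil x tl)]
      simp
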